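-- pv_equiv track=rewrite | github.com/NathanZlion/Competitive-Programming | Contest/A2SV G4 - Camp II Contest 5/test.py | solution
-- ===== SOURCE A (Python) =====
-- def solution(x):
--     """
--     this function takes in a string x, and returns the
--     deciphered string.
--
--     encryption mechanism:
--     lowercase is replaced with the correspnding reversed
--     lowercase letter.
--
--     What I could do is maybe hold an array of lowercase
--     elements. But that would be too costy finding every
--     character. Instead I would use ord and char.
--     """
--     res = []
--     for char in x:
--         if char.islower():
--             res.append(chr(ord('z') - ord(char) + ord('a')))
--         else:
--             res.append(char)
--
--     return "".join(res)
-- ===== SOURCE B (Python) =====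
-- def solution(x):
--     n = len(x)
--     if n == 0:
--         return ""
--     if n == 1:
--         return chr(219 - ord(x)) if 'a' <= x <= 'z' else x
--     mid = n // 2
--     return solution(x[:mid]) + solution(x[mid:])
-- ===== Notes on version B (the rewrite author's own statement) =====
-- stated objective: alternative
-- what changed: Replaces A's single left-to-right accumulator loop with islower/ord arithmetic by a divide-and-conquer recursion that splits the string in halves and mirrors a single character at the leaves via 219 - ord(c) under an explicit lowercase range comparison.
import Mathlib
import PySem

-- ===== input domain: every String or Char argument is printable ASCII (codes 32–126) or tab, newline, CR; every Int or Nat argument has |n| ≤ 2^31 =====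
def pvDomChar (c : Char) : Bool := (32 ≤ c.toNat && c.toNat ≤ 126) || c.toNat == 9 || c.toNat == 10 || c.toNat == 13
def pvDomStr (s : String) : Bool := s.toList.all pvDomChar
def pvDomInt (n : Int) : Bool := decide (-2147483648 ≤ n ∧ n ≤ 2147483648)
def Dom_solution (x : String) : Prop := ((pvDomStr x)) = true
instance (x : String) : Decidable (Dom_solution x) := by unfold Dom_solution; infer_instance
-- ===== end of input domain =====

-- B replaces A's accumulator loop by a divide-and-conquer recursion on string halves,
-- mirroring single characters at the leaves (alternative decomposition; same result).

-- ===== PORT A =====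
-- for char in x: if char.islower(): append(chr(ord('z') - ord(char) + ord('a'))) else: append(char); "".join(res)
def solution (x : String) : String :=
  String.ofList (x.toList.foldl
    (fun res char =>
      if PySem.Chars.islower char then
        res ++ [Char.ofNat (122 - char.toNat + 97)]
      else
        res ++ [char])
    [])

-- ===== PORT B =====
-- chr(219 - ord(x)) if 'a' <= x <= 'z' else x   (x a one-char string)
def solBChar (c : Char) : Char :=
  if 'a' ≤ c ∧ c ≤ 'z' then Char.ofNat (219 - c.toNat) else c

-- n == 0 → ""; n == 1 → mirrored char; else solution(x[:mid]) + solution(x[mid:])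
def solBGo (l : List Char) : List Char :=
  if l.length = 0 then []
  else if l.length = 1 then [solBChar l.headI]
  else
    let mid := l.length / 2
    solBGo (PySem.List.slice l none (some (mid : Int))) ++
      solBGo (PySem.List.slice l (some (mid : Int)) none)
termination_by l.length
decreasing_by
  · rw [PySem.List.slice_to_natCast]
    simp only [List.length_take]
    omega
  · rw [PySem.List.slice_from_natCast]
    simp only [List.length_drop]
    omega

def solution_alt (x : String) : String := String.ofList (solBGo x.toList)

-- ===== PRECONDITION & SPEC =====
def Spec_solution (x : String) (out : String) : Prop := out = solution_alt x
instance (x : String) (out : String) : Decidable (Spec_solution x out) := by unfold Spec_solution; infer_instance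

-- ===== CLAIM (what is proved, stated in full; the proofs are below) =====
def Claim_equal_solution : Prop := ∀ (x : String), Dom_solution x → Spec_solution x (solution x)

-- ===== LEMMAS AND PROOFS =====

def pvStepA (char : Char) : Char :=
  if PySem.Chars.islower char then Char.ofNat (122 - char.toNat + 97) else char

set_option maxRecDepth 8000 in
lemma pv_step_fin : ∀ n : Fin 128, pvStepA (Char.ofNat n.val) = solBChar (Char.ofNat n.val) := by
  decide

lemma pv_step_eq (c : Char) (h : pvDomChar c = true) : pvStepA c = solBChar c := by
  have hlt : c.toNat < 128 := by
    simp [pvDomChar] at h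
    omega
  have := pv_step_fin ⟨c.toNat, hlt⟩
  simpa [Char.ofNat_toNat] using this

lemma pv_foldl_append (f : Char → Char) :
    ∀ (l : List Char) (acc : List Char),
      l.foldl (fun res char => res ++ [f char]) acc = acc ++ l.map f := by
  intro l
  induction l with
  | nil => simp
  | cons c t ih => intro acc; simp [List.foldl, ih]

lemma pv_foldl_if_eq (l : List Char) (acc : List Char) :
    l.foldl (fun res char =>
        if PySem.Chars.islower char then res ++ [Char.ofNat (122 - char.toNat + 97)]
        else res ++ [char]) acc
      = l.foldl (fun res char => res ++ [pvStepA char]) acc := by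
  induction l generalizing acc with
  | nil => rfl
  | cons c t ih =>
    simp only [List.foldl, pvStepA]
    split_ifs <;> exact ih _

lemma solBGo_eq_map (l : List Char) : solBGo l = l.map solBChar := by
  induction hn : l.length using Nat.strong_induction_on generalizing l with
  | _ n ih =>
    subst hn
    rw [solBGo]
    split_ifs with h0 h1
    · rw [List.length_eq_zero_iff.mp h0]; rfl
    · obtain ⟨c, rfl⟩ := List.length_eq_one_iff.mp h1
      rfl
    · simp only [PySem.List.slice_to_natCast, PySem.List.slice_from_natCast]
      rw [ih _ (by simp only [List.length_take]; omega) _ rfl,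
        ih _ (by simp only [List.length_drop]; omega) _ rfl,
        ← List.map_append, List.take_append_drop]

-- ===== VERDICT (by name: the statement is the Claim_ definition above) =====
theorem solution_spec : Claim_equal_solution := by
  intro x hdom
  unfold Spec_solution solution solution_alt
  rw [pv_foldl_if_eq, pv_foldl_append, solBGo_eq_map]
  simp only [List.nil_append]
  congr 1
  apply List.map_congr_left
  intro c hc
  have hd : pvDomChar c = true := by
    have := hdom
    unfold Dom_solution pvDomStr at this
    exact List.all_eq_true.mp this c hc
  exact pv_step_eq c hd
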